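-- pv_equiv track=rewrite | github.com/sirex/databot | databot/exporters/utils.py | sort_fields
-- ===== SOURCE A (Python) =====
-- def commonstart(a, b):
--     for a, b in zip(a, b):
--         if a == b:
--             yield a
--         else:
--             break
--
-- def sort_fields(fields, include):
--     if include:
--         fields = set(fields)
--         sorted_fields = []
--         for item in include:
--             if item in fields:
--                 sorted_fields.append(item)
--                 fields.remove(item)
--             else:
--                 unsorted_fields = []
--                 for field in fields:
--                     common = tuple(commonstart(field, item))
--                     if len(item) == len(common) and len(field) >= len(common):
--                         unsorted_fields.append(field)
--                 for field in sorted(unsorted_fields):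
--                     sorted_fields.append(field)
--                     fields.remove(field)
--         return sorted_fields
--     else:
--         return sorted(fields)
-- ===== SOURCE B (Python) =====
-- def _search_left(arr, item, k):
--     # first index whose k-prefix is >= item, by binary search on the sorted arr
--     lo, hi = 0, len(arr)
--     while lo < hi:
--         mid = (lo + hi) // 2
--         if arr[mid][:k] < item:
--             lo = mid + 1
--         else:
--             hi = mid
--     return lo
--
--
-- def _search_right(arr, item, k):
--     # first index whose k-prefix is > item
--     lo, hi = 0, len(arr)
--     while lo < hi:
--         mid = (lo + hi) // 2
--         if arr[mid][:k] <= item: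
--             lo = mid + 1
--         else:
--             hi = mid
--     return lo
--
--
-- def sort_fields(fields, include):
--     if not include:
--         return sorted(fields)
--     arr = sorted(set(fields))          # one up-front sort of the distinct fields
--     alive = [True] * len(arr)
--     out = []
--     for item in include:
--         k = len(item)
--         # the fields having item as a prefix form one contiguous block of arr
--         lo = _search_left(arr, item, k)
--         hi = _search_right(arr, item, k)
--         if lo < hi and arr[lo] == item and alive[lo]:
--             out.append(arr[lo])
--             alive[lo] = False
--         else:
--             for i in range(lo, hi):
--                 if alive[i]:
--                     out.append(arr[i])
--                     alive[i] = False
--     return out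
-- ===== Notes on version B (the rewrite author's own statement) =====
-- stated objective: faster
-- what changed: B sorts the distinct fields once into an array, locates each include item's prefix block by binary search (the fields extending a prefix are contiguous in sorted order), and consumes fields via an alive mask, instead of A's per-include-item linear scan of a mutating set with a per-field common-prefix computation and a fresh sort of every matched group.
import Mathlib
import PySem

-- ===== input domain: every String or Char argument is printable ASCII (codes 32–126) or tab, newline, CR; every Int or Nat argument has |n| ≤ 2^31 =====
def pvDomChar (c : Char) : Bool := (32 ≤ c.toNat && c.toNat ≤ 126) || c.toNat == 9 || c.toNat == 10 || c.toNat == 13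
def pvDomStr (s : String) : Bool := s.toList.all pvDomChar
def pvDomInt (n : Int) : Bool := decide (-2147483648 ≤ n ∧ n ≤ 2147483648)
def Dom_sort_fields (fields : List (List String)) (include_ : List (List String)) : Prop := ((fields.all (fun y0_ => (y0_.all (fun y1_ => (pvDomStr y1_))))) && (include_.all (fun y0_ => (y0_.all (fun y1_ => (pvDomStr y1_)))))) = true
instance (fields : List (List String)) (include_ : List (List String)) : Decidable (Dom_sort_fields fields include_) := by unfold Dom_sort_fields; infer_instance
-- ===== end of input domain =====

-- B sorts the distinct fields once, finds each include item's prefix block by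
-- binary search (fields extending a prefix are contiguous in sorted order) and
-- consumes fields through an alive mask, instead of A's per-item linear scan of
-- a mutating set with a per-field prefix computation and a sort per group.

-- ===== PORT A =====
-- generator commonstart(a, b): the common leading elements of a and b
def commonstart (a b : List String) : List String :=
  ((a.zip b).takeWhile (fun p => p.1 == p.2)).map Prod.fst

-- body of A's 'for item in include' loop; state = (sorted_fields, fields-as-set)
def stepA (st : List (List String) × PySem.Set (List String)) (item : List String) :
    List (List String) × PySem.Set (List String) :=
  if PySem.Set.contains st.2 item then
    (st.1 ++ [item], (PySem.Set.remove? st.2 item).getD st.2)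
  else
    let unsorted := st.2.filter (fun field =>
      let common := commonstart field item
      (item.length == common.length) && (decide (common.length ≤ field.length)))
    (PySem.List.sorted unsorted (fun x => x) false).foldl
      (fun st2 field => (st2.1 ++ [field], (PySem.Set.remove? st2.2 field).getD st2.2)) st

def sort_fields (fields : List (List String)) (include_ : List (List String)) : List (List String) :=
  if include_ ≠ [] then
    (include_.foldl stepA ([], PySem.Set.ofList fields)).1
  else
    PySem.List.sorted fields (fun x => x) false

-- ===== PORT B =====
-- _search_left of Source B: the while-loop as structural recursion on a fuel
-- counter (fuel = hi - lo at the call site bounds the iterations; arr[mid][:k]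
-- is 'List.take k', exact since k ≥ 0 and mid is in range whenever the loop runs)
def searchLeft (arr : List (List String)) (item : List String) (k : Nat) :
    Nat → Nat → Nat → Nat
  | 0, lo, _ => lo
  | Nat.succ fuel, lo, hi =>
    if lo < hi then
      if List.take k (arr.getD ((lo + hi) / 2) []) < item then
        searchLeft arr item k fuel ((lo + hi) / 2 + 1) hi
      else
        searchLeft arr item k fuel lo ((lo + hi) / 2)
    else lo

-- _search_right of Source B
def searchRight (arr : List (List String)) (item : List String) (k : Nat) :
    Nat → Nat → Nat → Nat
  | 0, lo, _ => lo
  | Nat.succ fuel, lo, hi =>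
    if lo < hi then
      if List.take k (arr.getD ((lo + hi) / 2) []) ≤ item then
        searchRight arr item k fuel ((lo + hi) / 2 + 1) hi
      else
        searchRight arr item k fuel lo ((lo + hi) / 2)
    else lo

-- body of Source B's 'for item in include' loop; state = (out, alive mask over arr)
def stepN (arr : List (List String)) (st : List (List String) × List Bool) (item : List String) :
    List (List String) × List Bool :=
  let k := item.length
  let lo := searchLeft arr item k arr.length 0 arr.length
  let hi := searchRight arr item k arr.length 0 arr.length
  if lo < hi ∧ arr.getD lo [] = item ∧ st.2.getD lo false = true then
    (st.1 ++ [arr.getD lo []], st.2.set lo false)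
  else
    (List.range' lo (hi - lo)).foldl
      (fun st2 i => if st2.2.getD i false = true then (st2.1 ++ [arr.getD i []], st2.2.set i false) else st2) st

def sort_fields_alt (fields : List (List String)) (include_ : List (List String)) : List (List String) :=
  if include_ = [] then
    PySem.List.sorted fields (fun x => x) false
  else
    let arr := PySem.List.sorted (PySem.Set.ofList fields) (fun x => x) false
    (include_.foldl (stepN arr) ([], List.replicate arr.length true)).1

-- ===== PRECONDITION & SPEC =====
def Spec_sort_fields (fields : List (List String)) (include_ : List (List String)) (out : List (List String)) : Prop := out = sort_fields_alt fields include_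
instance (fields : List (List String)) (include_ : List (List String)) (out : List (List String)) : Decidable (Spec_sort_fields fields include_ out) := by unfold Spec_sort_fields; infer_instance

-- ===== CLAIM (what is proved, stated in full; the proofs are below) =====
def Claim_equal_sort_fields : Prop := ∀ (fields : List (List String)) (include_ : List (List String)), Dom_sort_fields fields include_ → Spec_sort_fields fields include_ (sort_fields fields include_)

-- ===== LEMMAS AND PROOFS =====

-- abstract description of both loops' step: remaining fields held as a plain list
def specStep (st : List (List String) × List (List String)) (item : List String) :
    List (List String) × List (List String) :=
  if item ∈ st.2 then
    (st.1 ++ [item], st.2.filter (fun f => f != item))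
  else
    (st.1 ++ st.2.filter (fun f => f.take item.length == item),
     st.2.filter (fun f => !(f.take item.length == item)))

-- the alive-mask state, read back as the list of still-alive fields in arr order
def gRem (arr : List (List String)) (alive : List Bool) (i : Nat) : Option (List String) :=
  if alive.getD i false = true then some (arr.getD i []) else none

def remOf (arr : List (List String)) (alive : List Bool) : List (List String) :=
  (List.range arr.length).filterMap (gRem arr alive)

lemma gRem_pos {arr : List (List String)} {alive : List Bool} {i : Nat}
    (hc : alive.getD i false = true) : gRem arr alive i = some (arr.getD i []) := by
  unfold gRem; rw [if_pos hc]

lemma gRem_neg {arr : List (List String)} {alive : List Bool} {i : Nat}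
    (hc : ¬ alive.getD i false = true) : gRem arr alive i = none := by
  unfold gRem; rw [if_neg hc]

lemma optFilter_some (p : List String → Bool) (x : List String) :
    Option.filter p (some x) = if p x then some x else none := rfl

lemma optFilter_none (p : List String → Bool) :
    Option.filter p (none : Option (List String)) = none := rfl

-- ---------- A-side: stepA over a set is specStep over the sorted remaining list ----------

-- A's commonstart-based test is the take-a-prefix test, as booleans
lemma cond_eq (f item : List String) :
    ((item.length == (commonstart f item).length) &&
      (decide ((commonstart f item).length ≤ f.length)))
    = (f.take item.length == item) := by
  induction f generalizing item with
  | nil => cases item <;> simp [commonstart]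
  | cons a as ih =>
    cases item with
    | nil => simp [commonstart]
    | cons b bs =>
      by_cases hab : a = b
      · subst hab
        simpa [commonstart] using ih bs
      · simp [commonstart, hab]

-- Python's set.remove after a membership test is 'discard', membership or not
lemma removeD_eq_discard (fs : PySem.Set (List String)) (x : List String) :
    (PySem.Set.remove? fs x).getD fs = PySem.Set.discard fs x := by
  by_cases h : x ∈ fs
  · rw [PySem.Set.remove?_of_mem h]; rfl
  · rw [(PySem.Set.remove?_eq_none_iff fs x).2 h, Option.getD_none]
    refine (List.filter_eq_self.2 ?_).symm
    intro y hy
    have hne : y ≠ x := fun e => h (e ▸ hy)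
    simp [hne]

-- folding set-removal over a list of values filters them all out
lemma foldl_discard (s : List (List String)) :
    ∀ fs : List (List String),
      s.foldl (fun fs f => PySem.Set.discard fs f) fs
        = fs.filter (fun x => !s.contains x) := by
  induction s with
  | nil => intro fs; simp
  | cons a s ih =>
    intro fs
    rw [List.foldl_cons, ih]
    simp only [PySem.Set.discard, List.filter_filter]
    apply List.filter_congr
    intro x _
    by_cases hx : x = a <;> simp [hx]

-- the two DecidableLT instances floating around on List String give one sorted
lemma sorted_inst (xs : List (List String)) (key : List String → List String) (rev : Bool) :
    @PySem.List.sorted _ _ List.instLT (fun a b => a.decidableLT b) xs key rev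
      = @PySem.List.sorted _ _ List.instLinearOrder.toLT LinearOrder.toDecidableLT xs key rev :=
  congrArg (fun d : (a b : List String) → Decidable (a < b) =>
    @PySem.List.sorted _ _ List.instLT d xs key rev) (Subsingleton.elim _ _)

-- sorting commutes with filtering a duplicate-free list
lemma sorted_filter (l : List (List String)) (p : List String → Bool) (h : l.Nodup) :
    PySem.List.sorted (l.filter p) (fun x => x) false
      = (PySem.List.sorted l (fun x => x) false).filter p := by
  rw [sorted_inst, sorted_inst]
  have hperm := @PySem.List.sorted_perm (List String) (List String)
    List.instLinearOrder.toLT LinearOrder.toDecidableLT l (fun x => x) false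
  have hle := PySem.List.sorted_pairwise l (fun x : List String => x)
  have hnd := hperm.nodup_iff.2 h
  have hne : List.Pairwise (fun a b : List String => a ≠ b) _ := hnd
  exact PySem.List.sorted_eq_of_perm_of_pairwise_lt (κ := List String) _ _ _
    (hperm.filter p)
    ((List.Pairwise.imp (fun hab => lt_of_le_of_ne hab.1 hab.2) (hle.and hne)).filter p)

-- one step of A's loop, under the invariant 'remaining = sorted(fields-set)'
lemma stepA_eq (fsA : List (List String)) (item : List String) (out : List (List String))
    (hnd : fsA.Nodup) :
    stepA (out, fsA) item
      = ((specStep (out, PySem.List.sorted fsA (fun x => x) false) item).1,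
         (stepA (out, fsA) item).2)
    ∧ (specStep (out, PySem.List.sorted fsA (fun x => x) false) item).2
        = PySem.List.sorted (stepA (out, fsA) item).2 (fun x => x) false
    ∧ (stepA (out, fsA) item).2.Nodup := by
  by_cases hmemA : item ∈ fsA
  · -- exact hit: both emit [item] and drop it
    have hc : PySem.Set.contains fsA item = true := by
      simp [PySem.Set.contains_eq_listContains, hmemA]
    have hstepA : stepA (out, fsA) item
        = (out ++ [item], fsA.filter (fun f => f != item)) := by
      simp only [stepA, hc, if_true, removeD_eq_discard, PySem.Set.discard]
      exact Prod.ext rfl (List.filter_congr (fun x _ => by simp [bne]))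
    have hstepB : specStep (out, PySem.List.sorted fsA (fun x => x) false) item
        = (out ++ [item],
           (PySem.List.sorted fsA (fun x => x) false).filter (fun f => f != item)) := by
      simp [specStep, PySem.List.mem_sorted, hmemA]
    refine ⟨?_, ?_, ?_⟩
    · rw [hstepA, hstepB]
    · rw [hstepA, hstepB, sorted_filter _ _ hnd]
    · rw [hstepA]; exact hnd.filter _
  · -- no exact hit: both emit the sorted prefix-extension group and drop it
    have hc : PySem.Set.contains fsA item = false := by
      simp [PySem.Set.contains_eq_listContains, hmemA]
    set pt : List String → Bool := fun f => List.take item.length f == item with hpt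
    have hfly : (fun field =>
        (item.length == (commonstart field item).length) &&
          (decide ((commonstart field item).length ≤ field.length))) = pt := by
      funext field
      exact cond_eq field item
    set s : List (List String) :=
      PySem.List.sorted (fsA.filter pt) (fun x => x) false with hs
    have hstepA : stepA (out, fsA) item
        = (out ++ s, fsA.filter (fun x => !s.contains x)) := by
      simp only [stepA, hc, Bool.false_eq_true, if_false, hfly, ← hs]
      rw [PySem.List.foldl_prod_mk
        (fun (o : List (List String)) (f : List String) => o ++ [f])
        (fun (fs : PySem.Set (List String)) (f : List String) =>
          (PySem.Set.remove? fs f).getD fs) s out fsA]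
      have hg : (fun (fs : PySem.Set (List String)) (f : List String) =>
          (PySem.Set.remove? fs f).getD fs)
          = fun fs f => PySem.Set.discard fs f := by
        funext fs f; exact removeD_eq_discard fs f
      rw [hg, foldl_discard, PySem.List.foldl_append_singleton]
    have hstepB : specStep (out, PySem.List.sorted fsA (fun x => x) false) item
        = (out ++ (PySem.List.sorted fsA (fun x => x) false).filter pt,
           (PySem.List.sorted fsA (fun x => x) false).filter (fun f => !(pt f))) := by
      simp [specStep, PySem.List.mem_sorted, hmemA, hpt]
    have hsd : s = (PySem.List.sorted fsA (fun x => x) false).filter pt :=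
      sorted_filter fsA pt hnd
    have hfilters : fsA.filter (fun x => !s.contains x) = fsA.filter (fun x => !(pt x)) := by
      apply List.filter_congr
      intro x hx
      have hcs : s.contains x = pt x := by
        by_cases hpx : pt x = true
        · simp [hs, PySem.List.mem_sorted, List.mem_filter, hx, hpx]
        · simp only [Bool.not_eq_true] at hpx
          simp [hs, PySem.List.mem_sorted, List.mem_filter, hpx]
      rw [hcs]
    refine ⟨?_, ?_, ?_⟩
    · rw [hstepA, hstepB, hsd]
    · rw [hstepA, hstepB, hfilters, sorted_filter _ _ hnd]
    · rw [hstepA]; exact hnd.filter _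

-- A's loop invariant, iterated over include
lemma loopA (inc : List (List String)) :
    ∀ (out fsA : List (List String)), fsA.Nodup →
      (inc.foldl stepA (out, fsA)).1
        = (inc.foldl specStep (out, PySem.List.sorted fsA (fun x => x) false)).1 := by
  induction inc with
  | nil => intro out fsA _; rfl
  | cons item inc ih =>
    intro out fsA hnd
    obtain ⟨h1, h2, h3⟩ := stepA_eq fsA item out hnd
    simp only [List.foldl_cons]
    have : specStep (out, PySem.List.sorted fsA (fun x => x) false) item
        = ((stepA (out, fsA) item).1,
           PySem.List.sorted (stepA (out, fsA) item).2 (fun x => x) false) := by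
      rw [← h2]
      exact Prod.ext (by rw [h1]) rfl
    rw [this]
    have := ih (stepA (out, fsA) item).1 (stepA (out, fsA) item).2 h3
    simpa using this

-- ---------- order lemmas for the binary searches ----------

lemma nil_le' (x : List String) : ([] : List String) ≤ x := by
  cases x with
  | nil => exact le_refl _
  | cons a as => exact le_of_lt (List.Lex.nil)

-- a prefix is ≤ the whole list (lexicographically)
lemma take_le_self (x : List String) : ∀ k : Nat, x.take k ≤ x := by
  induction x with
  | nil => intro k; simp
  | cons a as ih =>
    intro k
    cases k with
    | zero => exact nil_le' _
    | succ k => simpa using List.cons_le_cons a (ih k)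

-- taking a prefix is monotone for the lexicographic order
lemma take_lt_le {a b : List String} (h : List.Lex (· < ·) a b) :
    ∀ k : Nat, a.take k ≤ b.take k := by
  induction h with
  | nil => intro k; simpa using nil_le' _
  | @rel x xs y ys hxy =>
    intro k
    cases k with
    | zero => exact le_refl _
    | succ k => exact le_of_lt (List.Lex.rel hxy)
  | @cons x xs ys hlex ih =>
    intro k
    cases k with
    | zero => exact le_refl _
    | succ k =>
      simp only [List.take_succ_cons]
      exact List.cons_le_cons x (ih k)

lemma take_le_take {a b : List String} (h : a ≤ b) (k : Nat) : a.take k ≤ b.take k := by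
  rcases h.lt_or_eq with h | h
  · exact take_lt_le h k
  · subst h; exact le_refl _

-- ---------- correctness of the binary searches ----------

lemma searchLeft_spec (arr : List (List String)) (item : List String) (k : Nat)
    (hmono : ∀ i j : Nat, i ≤ j → j < arr.length →
        List.take k (arr.getD j []) < item → List.take k (arr.getD i []) < item) :
    ∀ fuel lo hi, hi - lo ≤ fuel → lo ≤ hi → hi ≤ arr.length →
      (∀ i < lo, List.take k (arr.getD i []) < item) →
      (∀ i, hi ≤ i → i < arr.length → ¬ List.take k (arr.getD i []) < item) →
      (∀ i < searchLeft arr item k fuel lo hi, List.take k (arr.getD i []) < item) ∧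
      (∀ i, searchLeft arr item k fuel lo hi ≤ i → i < arr.length →
          ¬ List.take k (arr.getD i []) < item) ∧
      searchLeft arr item k fuel lo hi ≤ arr.length := by
  intro fuel
  induction fuel with
  | zero =>
    intro lo hi h0 hle hhi hbelow habove
    simp only [searchLeft]
    exact ⟨hbelow, fun i h1 h2 => habove i (by omega) h2, by omega⟩
  | succ fuel ih =>
    intro lo hi h0 hle hhi hbelow habove
    simp only [searchLeft]
    by_cases h : lo < hi
    · rw [if_pos h]
      by_cases hc : List.take k (arr.getD ((lo + hi) / 2) []) < item
      · rw [if_pos hc]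
        exact ih ((lo + hi) / 2 + 1) hi (by omega) (by omega) hhi
          (fun i hi' => hmono i ((lo + hi) / 2) (by omega) (by omega) hc) habove
      · rw [if_neg hc]
        exact ih lo ((lo + hi) / 2) (by omega) (by omega) (by omega) hbelow
          (fun i h1 h2 hP => hc (hmono ((lo + hi) / 2) i h1 h2 hP))
    · rw [if_neg h]
      exact ⟨hbelow, fun i h1 h2 => habove i (by omega) h2, by omega⟩

lemma searchRight_spec (arr : List (List String)) (item : List String) (k : Nat)
    (hmono : ∀ i j : Nat, i ≤ j → j < arr.length →
        List.take k (arr.getD j []) ≤ item → List.take k (arr.getD i []) ≤ item) :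
    ∀ fuel lo hi, hi - lo ≤ fuel → lo ≤ hi → hi ≤ arr.length →
      (∀ i < lo, List.take k (arr.getD i []) ≤ item) →
      (∀ i, hi ≤ i → i < arr.length → ¬ List.take k (arr.getD i []) ≤ item) →
      (∀ i < searchRight arr item k fuel lo hi, List.take k (arr.getD i []) ≤ item) ∧
      (∀ i, searchRight arr item k fuel lo hi ≤ i → i < arr.length →
          ¬ List.take k (arr.getD i []) ≤ item) ∧
      searchRight arr item k fuel lo hi ≤ arr.length := by
  intro fuel
  induction fuel with
  | zero =>
    intro lo hi h0 hle hhi hbelow habove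
    simp only [searchRight]
    exact ⟨hbelow, fun i h1 h2 => habove i (by omega) h2, by omega⟩
  | succ fuel ih =>
    intro lo hi h0 hle hhi hbelow habove
    simp only [searchRight]
    by_cases h : lo < hi
    · rw [if_pos h]
      by_cases hc : List.take k (arr.getD ((lo + hi) / 2) []) ≤ item
      · rw [if_pos hc]
        exact ih ((lo + hi) / 2 + 1) hi (by omega) (by omega) hhi
          (fun i hi' => hmono i ((lo + hi) / 2) (by omega) (by omega) hc) habove
      · rw [if_neg hc]
        exact ih lo ((lo + hi) / 2) (by omega) (by omega) (by omega) hbelow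
          (fun i h1 h2 hP => hc (hmono ((lo + hi) / 2) i h1 h2 hP))
    · rw [if_neg h]
      exact ⟨hbelow, fun i h1 h2 => habove i (by omega) h2, by omega⟩

-- on a strictly increasing arr, [L, R) is exactly the block with k-prefix = item
lemma block_char (arr : List (List String)) (item : List String)
    (hpair : arr.Pairwise (· < ·)) :
    searchLeft arr item item.length arr.length 0 arr.length ≤ searchRight arr item item.length arr.length 0 arr.length ∧
    searchRight arr item item.length arr.length 0 arr.length ≤ arr.length ∧
    (∀ i, i < arr.length →
      ((searchLeft arr item item.length arr.length 0 arr.length ≤ i ∧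
        i < searchRight arr item item.length arr.length 0 arr.length) ↔
        List.take item.length (arr.getD i []) = item)) := by
  have hmono : ∀ i j : Nat, i ≤ j → j < arr.length → arr.getD i [] ≤ arr.getD j [] := by
    intro i j hij hj
    rcases Nat.lt_or_ge i j with h | h
    · have := (List.pairwise_iff_getElem.1 hpair) i j (by omega) hj h
      rw [List.getD_eq_getElem _ _ (by omega), List.getD_eq_getElem _ _ hj]
      exact le_of_lt this
    · have : i = j := by omega
      subst this; exact le_refl _
  have hmL : ∀ i j : Nat, i ≤ j → j < arr.length →
      List.take item.length (arr.getD j []) < item →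
      List.take item.length (arr.getD i []) < item := by
    intro i j hij hj h
    exact lt_of_le_of_lt (take_le_take (hmono i j hij hj) item.length) h
  have hmR : ∀ i j : Nat, i ≤ j → j < arr.length →
      List.take item.length (arr.getD j []) ≤ item →
      List.take item.length (arr.getD i []) ≤ item := by
    intro i j hij hj h
    exact le_trans (take_le_take (hmono i j hij hj) item.length) h
  obtain ⟨hL1, hL2, hL3⟩ := searchLeft_spec arr item item.length hmL arr.length 0 arr.length
    (by omega) (by omega) (le_refl _) (by omega) (by omega)
  obtain ⟨hR1, hR2, hR3⟩ := searchRight_spec arr item item.length hmR arr.length 0 arr.length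
    (by omega) (by omega) (le_refl _) (by omega) (by omega)
  refine ⟨?_, hR3, ?_⟩
  · by_contra hLR
    have hRL : searchRight arr item item.length arr.length 0 arr.length
        < searchLeft arr item item.length arr.length 0 arr.length := by omega
    have hRlen : searchRight arr item item.length arr.length 0 arr.length < arr.length := by omega
    have h1 := hL1 _ hRL  -- take < item at R
    have h2 := hR2 _ (le_refl _) hRlen  -- ¬ take ≤ item at R
    exact h2 (le_of_lt h1)
  · intro i hi
    constructor
    · rintro ⟨hLi, hiR⟩
      have h1 := hL2 i hLi hi   -- ¬ take < item
      have h2 := hR1 i hiR      -- take ≤ item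
      exact le_antisymm h2 (not_lt.1 h1)
    · intro heq
      constructor
      · by_contra hLi
        have hlt : i < searchLeft arr item item.length arr.length 0 arr.length := by omega
        exact absurd (hL1 i hlt) (by rw [heq]; exact lt_irrefl _)
      · by_contra hiR
        have hge : searchRight arr item item.length arr.length 0 arr.length ≤ i := by omega
        exact (hR2 i hge hi) (le_of_eq heq)

-- ---------- alive-mask bookkeeping ----------

lemma getD_set_false (alive : List Bool) (i j : Nat) :
    (alive.set i false).getD j false = if j = i then false else alive.getD j false := by
  by_cases h : j = i
  · subst h
    by_cases hl : j < alive.length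
    · simp [List.getD_eq_getElem?_getD, List.getElem?_set, hl]
    · simp [List.getD_eq_getElem?_getD, List.getElem?_set, hl,
        List.getElem?_eq_none (by omega : alive.length ≤ j)]
  · simp [List.getD_eq_getElem?_getD, List.getElem?_set_ne (Ne.symm h), h]

lemma set_false_of_getD_false (alive : List Bool) (i : Nat)
    (h : alive.getD i false = false) : alive.set i false = alive := by
  apply List.ext_getElem?
  intro j
  rw [List.getElem?_set]
  by_cases hij : i = j
  · subst hij
    by_cases hl : i < alive.length
    · have : alive[i] = false := by
        rw [List.getD_eq_getElem _ _ hl] at h; exact h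
      simp [hl, this, List.getElem?_eq_getElem hl]
    · simp [hl]
  · simp [hij]

lemma clear_getD (l : List Nat) : ∀ (alive : List Bool) (i : Nat),
    (l.foldl (fun a j => a.set j false) alive).getD i false
      = if i ∈ l then false else alive.getD i false := by
  induction l with
  | nil => intro alive i; simp
  | cons j l ih =>
    intro alive i
    simp only [List.foldl_cons, ih, List.mem_cons]
    rw [getD_set_false]
    by_cases h1 : i ∈ l <;> by_cases h2 : i = j <;> simp [h1, h2]

-- closed form of Source B's inner 'for i in range(lo, hi)' loop
lemma blockFold_spec (arr : List (List String)) :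
    ∀ (l : List Nat), l.Nodup → ∀ (out : List (List String)) (alive : List Bool),
      l.foldl (fun st2 i =>
          if st2.2.getD i false = true then (st2.1 ++ [arr.getD i []], st2.2.set i false)
          else st2) (out, alive)
        = (out ++ l.filterMap (gRem arr alive),
           l.foldl (fun a j => a.set j false) alive) := by
  intro l
  induction l with
  | nil => intro _ out alive; simp
  | cons i l ih =>
    intro hnd out alive
    have hnin : i ∉ l := (List.nodup_cons.1 hnd).1
    have hnd' := (List.nodup_cons.1 hnd).2
    simp only [List.foldl_cons]
    have hg : l.filterMap (gRem arr (alive.set i false)) = l.filterMap (gRem arr alive) :=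
      List.filterMap_congr (fun j hj => by
        have hji : j ≠ i := fun e => hnin (e ▸ hj)
        unfold gRem
        rw [getD_set_false, if_neg hji])
    by_cases hc : alive.getD i false = true
    · rw [if_pos hc, ih hnd', hg, List.filterMap_cons_some (gRem_pos hc)]
      simp
    · rw [if_neg hc, ih hnd', List.filterMap_cons_none (gRem_neg hc),
        set_false_of_getD_false _ _ (by simpa using hc)]

-- ---------- reading remOf through the block ----------

lemma mem_remOf (arr : List (List String)) (alive : List Bool) (x : List String) :
    x ∈ remOf arr alive ↔
      ∃ i, i < arr.length ∧ arr.getD i [] = x ∧ alive.getD i false = true := by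
  simp only [remOf, List.mem_filterMap, List.mem_range, gRem]
  constructor
  · rintro ⟨i, hi, hsome⟩
    by_cases hc : alive.getD i false = true
    · rw [if_pos hc] at hsome
      exact ⟨i, hi, (Option.some_inj.1 hsome), hc⟩
    · rw [if_neg hc] at hsome; cases hsome
  · rintro ⟨i, hi, hx, hc⟩
    exact ⟨i, hi, by rw [if_pos hc, hx]⟩

lemma rem_set (arr : List (List String)) (alive : List Bool) (item : List String) (L : Nat)
    (hL : L < arr.length) (hitem : arr.getD L [] = item) (hnd : arr.Nodup) :
    remOf arr (alive.set L false) = (remOf arr alive).filter (fun f => f != item) := by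
  unfold remOf
  rw [List.filter_filterMap]
  apply List.filterMap_congr
  intro i hi
  rw [List.mem_range] at hi
  by_cases hiL : i = L
  · subst hiL
    have h1 : (alive.set i false).getD i false = false := by
      rw [getD_set_false, if_pos rfl]
    by_cases hc : alive.getD i false = true
    · rw [gRem_neg (by rw [h1]; simp), gRem_pos hc, hitem]
      simp [optFilter_some]
    · rw [gRem_neg (by rw [h1]; simp), gRem_neg hc, optFilter_none]
  · have hset : (alive.set L false).getD i false = alive.getD i false := by
      rw [getD_set_false, if_neg hiL]
    have hne : arr.getD i [] ≠ item := by
      rw [← hitem]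
      rw [List.getD_eq_getElem _ _ hi]
      rw [List.getD_eq_getElem _ _ hL]
      intro h
      exact hiL ((hnd.getElem_inj_iff).1 h)
    by_cases hc : alive.getD i false = true
    · rw [show gRem arr (alive.set L false) i = some (arr.getD i []) from by
        unfold gRem; rw [hset, if_pos hc], gRem_pos hc,
        optFilter_some, if_pos (by simpa using hne)]
    · rw [show gRem arr (alive.set L false) i = none from by
        unfold gRem; rw [hset, if_neg hc], gRem_neg hc, optFilter_none]

lemma range_filter_block (lo hi : Nat) :
    ∀ n, (List.range n).filter (fun i => decide (lo ≤ i) && decide (i < hi))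
      = List.range' lo (min hi n - lo) := by
  intro n
  induction n with
  | zero => simp
  | succ n ih =>
    rw [List.range_succ, List.filter_append, ih]
    by_cases hb : lo ≤ n ∧ n < hi
    · have h1 : min hi (n + 1) - lo = (min hi n - lo) + 1 := by omega
      have h2 : lo + 1 * (min hi n - lo) = n := by omega
      rw [h1, List.range'_concat, h2]
      simp [hb.1, hb.2]
    · have h1 : min hi (n + 1) - lo = min hi n - lo := by omega
      rw [h1]
      have : ¬ (lo ≤ n ∧ n < hi) := hb
      simp only [List.filter_cons, List.filter_nil]
      rcases Decidable.not_and_iff_not_or_not.1 this with h | h <;> simp [h]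

lemma filterMap_block (arr : List (List String)) (alive : List Bool)
    (p : List String → Bool) (lo hi : Nat) (h1 : lo ≤ hi) (h2 : hi ≤ arr.length)
    (hin : ∀ i, i < arr.length → lo ≤ i → i < hi → p (arr.getD i []) = true)
    (hout : ∀ i, i < arr.length → (i < lo ∨ hi ≤ i) → p (arr.getD i []) = false) :
    (remOf arr alive).filter p = (List.range' lo (hi - lo)).filterMap (gRem arr alive) := by
  unfold remOf
  rw [List.filter_filterMap]
  have hrange : List.range' lo (hi - lo)
      = (List.range arr.length).filter (fun i => decide (lo ≤ i) && decide (i < hi)) := by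
    rw [range_filter_block]
    congr 1
    omega
  rw [hrange, List.filterMap_filter]
  apply List.filterMap_congr
  intro i hi'
  rw [List.mem_range] at hi'
  by_cases hb : lo ≤ i ∧ i < hi
  · rw [if_pos (by simp [hb.1, hb.2])]
    have hp := hin i hi' hb.1 hb.2
    by_cases hc : alive.getD i false = true
    · rw [gRem_pos hc, optFilter_some, if_pos hp]
    · rw [gRem_neg hc, optFilter_none]
  · rw [if_neg (by simpa using hb)]
    have hp := hout i hi' (by omega)
    by_cases hc : alive.getD i false = true
    · rw [gRem_pos hc, optFilter_some, if_neg (by rw [hp]; simp)]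
    · rw [gRem_neg hc, optFilter_none]

lemma rem_clear_block (arr : List (List String)) (alive : List Bool)
    (p : List String → Bool) (lo hi : Nat) (h1 : lo ≤ hi) (h2 : hi ≤ arr.length)
    (hin : ∀ i, i < arr.length → lo ≤ i → i < hi → p (arr.getD i []) = true)
    (hout : ∀ i, i < arr.length → (i < lo ∨ hi ≤ i) → p (arr.getD i []) = false) :
    remOf arr ((List.range' lo (hi - lo)).foldl (fun a j => a.set j false) alive)
      = (remOf arr alive).filter (fun f => !(p f)) := by
  unfold remOf
  rw [List.filter_filterMap]
  apply List.filterMap_congr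
  intro i hi'
  rw [List.mem_range] at hi'
  have hmem : i ∈ List.range' lo (hi - lo) ↔ lo ≤ i ∧ i < hi := by
    rw [List.mem_range'_1]
    omega
  by_cases hb : lo ≤ i ∧ i < hi
  · have hp := hin i hi' hb.1 hb.2
    have hcl : ((List.range' lo (hi - lo)).foldl (fun a j => a.set j false) alive).getD i false
        = false := by
      rw [clear_getD, if_pos (hmem.2 hb)]
    rw [gRem_neg (by rw [hcl]; simp)]
    by_cases hc : alive.getD i false = true
    · rw [gRem_pos hc, optFilter_some, if_neg (by rw [hp]; simp)]
    · rw [gRem_neg hc, optFilter_none]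
  · have hni : i ∉ List.range' lo (hi - lo) := fun h => hb (hmem.1 h)
    have hcl : ((List.range' lo (hi - lo)).foldl (fun a j => a.set j false) alive).getD i false
        = alive.getD i false := by
      rw [clear_getD, if_neg hni]
    have hp := hout i hi' (by omega)
    by_cases hc : alive.getD i false = true
    · rw [show gRem arr ((List.range' lo (hi - lo)).foldl (fun a j => a.set j false) alive) i
          = some (arr.getD i []) from by unfold gRem; rw [hcl, if_pos hc], gRem_pos hc,
        optFilter_some, if_pos (by rw [hp]; simp)]
    · rw [show gRem arr ((List.range' lo (hi - lo)).foldl (fun a j => a.set j false) alive) i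
          = none from by unfold gRem; rw [hcl, if_neg hc], gRem_neg hc, optFilter_none]

-- ---------- one step of Source B's loop is specStep, through remOf ----------

lemma stepN_eq (arr : List (List String)) (hpair : arr.Pairwise (· < ·))
    (out : List (List String)) (alive : List Bool) (item : List String) :
    (stepN arr (out, alive) item).1 = (specStep (out, remOf arr alive) item).1 ∧
    remOf arr (stepN arr (out, alive) item).2 = (specStep (out, remOf arr alive) item).2 := by
  have hnd : arr.Nodup := hpair.imp ne_of_lt
  obtain ⟨hLR, hRn, hchar⟩ := block_char arr item hpair
  set k := item.length with hk
  set L := searchLeft arr item k arr.length 0 arr.length with hLdef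
  set R := searchRight arr item k arr.length 0 arr.length with hRdef
  -- the element at index L, when the block is nonempty, is ≥ item; it equals item iff item occurs
  have harrL : ∀ i, i < arr.length → arr.getD i [] = item →
      (L < R ∧ arr.getD L [] = item ∧ i = L) := by
    intro i hi hx
    have htake : List.take k (arr.getD i []) = item := by
      rw [hx, hk, List.take_length]
    have hblock := (hchar i hi).2 htake
    have hLn : L < arr.length := by omega
    have htakeL : List.take k (arr.getD L []) = item :=
      (hchar L hLn).1 ⟨le_refl _, by omega⟩
    have h1 : item ≤ arr.getD L [] := by
      conv_lhs => rw [← htakeL]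
      exact take_le_self _ _
    have h2 : arr.getD L [] ≤ arr.getD i [] := by
      rcases Nat.lt_or_ge L i with h | h
      · have := (List.pairwise_iff_getElem.1 hpair) L i hLn hi h
        rw [List.getD_eq_getElem _ _ hLn, List.getD_eq_getElem _ _ hi]
        exact le_of_lt this
      · have : L = i := by omega
        subst this; exact le_refl _
    have heqL : arr.getD L [] = item := le_antisymm (hx ▸ h2) h1
    have hiL : i = L := by
      rw [List.getD_eq_getElem _ _ hi] at hx
      rw [List.getD_eq_getElem _ _ hLn] at heqL
      exact (hnd.getElem_inj_iff).1 (hx.trans heqL.symm)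
    exact ⟨by omega, heqL, hiL⟩
  by_cases hex : L < R ∧ arr.getD L [] = item ∧ alive.getD L false = true
  · -- exact hit
    have hLn : L < arr.length := by omega
    have hmem : item ∈ remOf arr alive :=
      (mem_remOf arr alive item).2 ⟨L, hLn, hex.2.1, hex.2.2⟩
    have hsN : stepN arr (out, alive) item = (out ++ [arr.getD L []], alive.set L false) := by
      simp only [stepN, ← hk, ← hLdef, ← hRdef]
      rw [if_pos hex]
    have hsS : specStep (out, remOf arr alive) item
        = (out ++ [item], (remOf arr alive).filter (fun f => f != item)) := by
      simp [specStep, hmem]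
    rw [hsN, hsS]
    exact ⟨by rw [hex.2.1], rem_set arr alive item L hLn hex.2.1 hnd⟩
  · -- no exact hit: consume the whole alive block
    have hnmem : item ∉ remOf arr alive := by
      intro hm
      obtain ⟨i, hi, hx, hal⟩ := (mem_remOf arr alive item).1 hm
      obtain ⟨e1, e2, e3⟩ := harrL i hi hx
      exact hex ⟨e1, e2, e3 ▸ hal⟩
    have hsN : stepN arr (out, alive) item
        = (List.range' L (R - L)).foldl
            (fun st2 i => if st2.2.getD i false = true
              then (st2.1 ++ [arr.getD i []], st2.2.set i false) else st2) (out, alive) := by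
      simp only [stepN, ← hk, ← hLdef, ← hRdef]
      rw [if_neg hex]
    have hsS : specStep (out, remOf arr alive) item
        = (out ++ (remOf arr alive).filter (fun f => f.take k == item),
           (remOf arr alive).filter (fun f => !(f.take k == item))) := by
      simp [specStep, hnmem, ← hk]
    have hinB : ∀ i, i < arr.length → L ≤ i → i < R →
        ((arr.getD i []).take k == item) = true := by
      intro i hi h1 h2
      simpa using (hchar i hi).1 ⟨h1, h2⟩
    have houtB : ∀ i, i < arr.length → (i < L ∨ R ≤ i) →
        ((arr.getD i []).take k == item) = false := by
      intro i hi hor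
      have : ¬ (L ≤ i ∧ i < R) := by omega
      have := fun h => this ((hchar i hi).2 h)
      simpa using this
    rw [hsN, hsS, blockFold_spec arr _ (List.nodup_range' 1) out alive]
    constructor
    · rw [← filterMap_block arr alive (fun f => f.take k == item) L R hLR hRn hinB houtB]
    · exact rem_clear_block arr alive (fun f => f.take k == item) L R hLR hRn hinB houtB

-- Source B's loop, iterated over include
lemma loopN (arr : List (List String)) (hpair : arr.Pairwise (· < ·))
    (inc : List (List String)) :
    ∀ (out : List (List String)) (alive : List Bool),
      (inc.foldl (stepN arr) (out, alive)).1
        = (inc.foldl specStep (out, remOf arr alive)).1 := by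
  induction inc with
  | nil => intro out alive; rfl
  | cons item inc ih =>
    intro out alive
    obtain ⟨h1, h2⟩ := stepN_eq arr hpair out alive item
    simp only [List.foldl_cons]
    have hB : specStep (out, remOf arr alive) item
        = ((stepN arr (out, alive) item).1, remOf arr (stepN arr (out, alive) item).2) := by
      refine Prod.ext h1.symm h2.symm
    rw [hB]
    have := ih (stepN arr (out, alive) item).1 (stepN arr (out, alive) item).2
    simpa using this

-- with everything alive, remOf reads back arr itself
lemma remOf_replicate (arr : List (List String)) :
    remOf arr (List.replicate arr.length true) = arr := by
  unfold remOf
  have hg : ∀ i ∈ List.range arr.length,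
      gRem arr (List.replicate arr.length true) i = some (arr.getD i []) := by
    intro i hi
    rw [List.mem_range] at hi
    apply gRem_pos
    rw [List.getD_eq_getElem _ _ (by simpa using hi)]
    simp
  rw [List.filterMap_congr hg]
  apply List.ext_getElem
  · simp
  · intro i h1 h2
    simp [List.getD_eq_getElem?_getD, List.getElem?_eq_getElem h2]

-- ===== VERDICT (by name: the statement is the Claim_ definition above) =====
theorem sort_fields_spec : Claim_equal_sort_fields := by
  intro fields include_ _
  unfold Spec_sort_fields sort_fields sort_fields_alt
  by_cases h : include_ = []
  · simp [h]
  · simp only [h, ne_eq, not_false_eq_true, if_true]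
    have hnd := PySem.Set.nodup_ofList (α := List String) fields
    rw [loopA include_ [] _ hnd]
    have hpair : (PySem.List.sorted (PySem.Set.ofList fields) (fun x => x) false).Pairwise
        (· < ·) := by
      rw [sorted_inst]
      exact PySem.List.sorted_ofList_pairwise_lt fields
    rw [loopN _ hpair include_ [] _, remOf_replicate]
    simp
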